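-- pv_equiv track=rewrite | github.com/ZasshuNeko/-OC--Projet-n-3 | cartes.py | max_lenght
-- ===== SOURCE A (Python) =====
-- def max_lenght(entire_map):
-- 	max_x = None
-- 	max_y = None
-- 	for k in entire_map.keys():
-- 		if k[0] > 1:
-- 			if max_x is None or k[0] > max_x:
-- 				max_x = k[0]
-- 		if k[1] > 1:
-- 			if max_y is None or k[1] > max_y:
-- 				max_y = k[1]
-- 	return [max_x,max_y]
-- ===== SOURCE B (Python) =====
-- def max_lenght(entire_map):
-- 	xs = sorted(k[0] for k in entire_map.keys())
-- 	ys = sorted(k[1] for k in entire_map.keys())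
-- 	max_x = xs[-1] if xs and xs[-1] > 1 else None
-- 	max_y = ys[-1] if ys and ys[-1] > 1 else None
-- 	return [max_x, max_y]
-- ===== Notes on version B (the rewrite author's own statement) =====
-- stated objective: alternative
-- what changed: Replaced A's single-pass loop carrying two optional running-max accumulators by sort-then-pick: sort each coordinate list ascending and take the last element when it exceeds 1, else None.
import Mathlib
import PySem

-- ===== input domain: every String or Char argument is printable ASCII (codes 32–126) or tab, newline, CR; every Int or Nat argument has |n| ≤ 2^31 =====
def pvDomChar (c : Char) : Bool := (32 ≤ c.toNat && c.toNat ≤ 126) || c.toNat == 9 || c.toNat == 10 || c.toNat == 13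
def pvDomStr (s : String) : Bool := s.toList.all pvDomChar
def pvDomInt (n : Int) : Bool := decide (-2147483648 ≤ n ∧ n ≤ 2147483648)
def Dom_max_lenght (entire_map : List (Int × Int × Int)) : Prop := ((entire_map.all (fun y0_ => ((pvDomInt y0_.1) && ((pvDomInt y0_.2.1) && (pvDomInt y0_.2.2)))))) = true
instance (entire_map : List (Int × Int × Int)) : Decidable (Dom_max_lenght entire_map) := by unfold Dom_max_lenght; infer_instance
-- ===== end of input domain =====

-- B replaces A's single-pass loop with two optional running-max accumulators by sort-then-pick:
-- sort each coordinate list ascending, take the last element when it exceeds 1, else None (objective: alternative).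


-- ===== PORT A =====
-- one coordinate's update step: if c > 1 then take it when it beats the accumulator
def pvStepA (s : Option Int) (c : Int) : Option Int :=
  if c > 1 then
    match s with
    | none => some c
    | some m => if c > m then some c else some m
  else s

def max_lenght (entire_map : List (Int × Int × Int)) : List (Option Int) :=
  let st := entire_map.foldl
    (fun (s : Option Int × Option Int) k => (pvStepA s.1 k.1, pvStepA s.2 k.2.1))
    (none, none)
  [st.1, st.2]

-- ===== PORT B =====
-- 'xs[-1] if xs and xs[-1] > 1 else None' on the ascending-sorted coordinate list
def pvPick (s : List Int) : Option Int :=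
  match PySem.List.pyGet? s (-1) with
  | some m => if m > 1 then some m else none
  | none => none

def max_lenght_alt (entire_map : List (Int × Int × Int)) : List (Option Int) :=
  let xs := PySem.List.sorted (entire_map.map (fun k => k.1)) (fun x => x) false
  let ys := PySem.List.sorted (entire_map.map (fun k => k.2.1)) (fun x => x) false
  [pvPick xs, pvPick ys]

-- ===== PRECONDITION & SPEC =====
def Spec_max_lenght (entire_map : List (Int × Int × Int)) (out : List (Option Int)) : Prop := out = max_lenght_alt entire_map
instance (entire_map : List (Int × Int × Int)) (out : List (Option Int)) : Decidable (Spec_max_lenght entire_map out) := by unfold Spec_max_lenght; infer_instance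

-- ===== CLAIM (what is proved, stated in full; the proofs are below) =====
def Claim_equal_max_lenght : Prop := ∀ (entire_map : List (Int × Int × Int)), Dom_max_lenght entire_map → Spec_max_lenght entire_map (max_lenght entire_map)

-- ===== LEMMAS AND PROOFS =====

-- combine an accumulator with an optional maximum
def pvOMax (a b : Option Int) : Option Int :=
  match a, b with
  | none, b => b
  | a, none => a
  | some a, some b => some (max a b)

lemma pvStepA_eq_omax (s : Option Int) (c : Int) (h : c > 1) :
    pvStepA s c = pvOMax s (some c) := by
  cases s with
  | none => simp [pvStepA, pvOMax, h]
  | some m =>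
    simp only [pvStepA, pvOMax, if_pos h]
    rcases lt_or_ge m c with h' | h'
    · simp [h', max_eq_right h'.le]
    · simp [not_lt.mpr h', max_eq_left h']

lemma pvOMax_assoc (a b c : Option Int) :
    pvOMax (pvOMax a b) c = pvOMax a (pvOMax b c) := by
  cases a <;> cases b <;> cases c <;> simp [pvOMax, max_assoc]

lemma max?_cons_omax (x : Int) (l : List Int) :
    (x :: l).max? = pvOMax (some x) l.max? := by
  rw [List.max?_cons]
  cases h : l.max? <;> simp [pvOMax]

-- A's running-max fold over one coordinate equals max? of the >1-filtered list
lemma foldl_stepA (l : List Int) (a : Option Int) :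
    l.foldl pvStepA a = pvOMax a (l.filter (fun x => x > 1)).max? := by
  induction l generalizing a with
  | nil => cases a <;> simp [pvOMax]
  | cons x l ih =>
    rw [List.foldl_cons, ih]
    by_cases h : x > 1
    · rw [pvStepA_eq_omax a x h]
      rw [show (x :: l).filter (fun x => decide (x > 1)) = x :: l.filter (fun x => decide (x > 1))
        from by simp [h]]
      rw [max?_cons_omax, pvOMax_assoc]
    · have hs : pvStepA a x = a := by simp [pvStepA, h]
      rw [hs]
      simp [h]

-- the paired fold splits into two independent folds
lemma pair_foldl (l : List (Int × Int × Int)) (a b : Option Int) :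
    l.foldl (fun (s : Option Int × Option Int) k => (pvStepA s.1 k.1, pvStepA s.2 k.2.1)) (a, b)
      = ((l.map (fun k => k.1)).foldl pvStepA a, (l.map (fun k => k.2.1)).foldl pvStepA b) := by
  induction l generalizing a b with
  | nil => simp
  | cons k t ih => simp [ih]

-- every member of a list is bounded by its max?
lemma le_of_max? (t : List Int) (n : Int) (ht : t.max? = some n) : ∀ x ∈ t, x ≤ n := by
  induction t generalizing n with
  | nil => simp at ht
  | cons y u ih =>
    rw [max?_cons_omax] at ht
    intro x hx
    cases hu : u.max? with
    | none =>
      rw [hu] at ht; simp [pvOMax] at ht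
      have : u = [] := List.max?_eq_none_iff.mp hu
      subst this; simp at hx; omega
    | some p =>
      rw [hu] at ht; simp [pvOMax] at ht
      rcases List.mem_cons.mp hx with h | h
      · subst h; subst ht; exact le_max_left _ _
      · have := ih p hu x h
        subst ht; exact le_trans this (le_max_right _ _)

-- a member bounding all members is the max?
lemma max?_char (l : List Int) (m : Int) (hm : m ∈ l) (hall : ∀ x ∈ l, x ≤ m) :
    l.max? = some m := by
  induction l with
  | nil => cases hm
  | cons x t ih =>
    rw [max?_cons_omax]
    cases ht : t.max? with
    | none =>
      have : t = [] := List.max?_eq_none_iff.mp ht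
      subst this
      simp at hm; subst hm; simp [pvOMax]
    | some n =>
      have hn : n ∈ t := List.max?_mem ht
      rcases List.mem_cons.mp hm with hm | hm
      · have h1 : n ≤ m := hall n (List.mem_cons_of_mem _ hn)
        subst hm
        simp [pvOMax, max_eq_left h1]
      · have h2 : m ≤ n := le_of_max? t n ht m hm
        have h3 : n ≤ m := hall n (List.mem_cons_of_mem _ hn)
        have hnm : n = m := le_antisymm h3 h2
        subst hnm
        have hx : x ≤ n := hall x (List.mem_cons_self)
        simp [pvOMax, max_eq_right hx]

-- last element of a (·≤·)-pairwise list bounds every element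
lemma pairwise_getLast?_max (s : List Int) (m : Int) (hp : s.Pairwise (· ≤ ·))
    (hl : s.getLast? = some m) : ∀ x ∈ s, x ≤ m := by
  induction s with
  | nil => simp at hl
  | cons y t ih =>
    cases t with
    | nil =>
      simp at hl; subst hl; simp
    | cons z u =>
      rw [List.getLast?_cons_cons] at hl
      have hp' := List.pairwise_cons.mp hp
      intro x hx
      rcases List.mem_cons.mp hx with hx | hx
      · subst hx
        exact hp'.1 m (List.mem_of_getLast? hl)
      · exact ih hp'.2 hl x hx

-- B's pick on the sorted list equals max? of the >1-filtered list
lemma pick_sorted (l : List Int) :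
    pvPick (PySem.List.sorted l (fun x => x) false) = (l.filter (fun x => x > 1)).max? := by
  set s := PySem.List.sorted l (fun x => x) false with hs
  cases hl : s.getLast? with
  | none =>
    have hse : s = [] := List.getLast?_eq_none_iff.mp hl
    have hle : l = [] := (PySem.List.sorted_eq_nil_iff l (fun x => x) false).mp (hs ▸ hse)
    subst hle
    simp [pvPick, PySem.List.pyGet?_neg_one, hl]
  | some m =>
    have hperm : s.Perm l := hs ▸ PySem.List.sorted_perm l (fun x => x) false
    have hpw : s.Pairwise (· ≤ ·) := by
      have := PySem.List.sorted_pairwise l (fun x => x)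
      simpa using hs ▸ this
    have hmem : m ∈ l := hperm.mem_iff.mp (List.mem_of_getLast? hl)
    have hbound : ∀ x ∈ l, x ≤ m := fun x hx =>
      pairwise_getLast?_max s m hpw hl x (hperm.mem_iff.mpr hx)
    simp only [pvPick, PySem.List.pyGet?_neg_one, hl]
    by_cases hm1 : m > 1
    · rw [if_pos hm1]
      symm
      apply max?_char
      · simp only [List.mem_filter]
        exact ⟨hmem, by simpa using hm1⟩
      · intro x hx
        exact hbound x (List.mem_of_mem_filter hx)
    · rw [if_neg hm1]
      have hfe : l.filter (fun x => x > 1) = [] := by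
        rw [List.filter_eq_nil_iff]
        intro x hx
        have := hbound x hx
        simp; omega
      simp [hfe]

-- ===== VERDICT (by name: the statement is the Claim_ definition above) =====
theorem max_lenght_spec : Claim_equal_max_lenght := by
  intro entire_map _
  show max_lenght entire_map = max_lenght_alt entire_map
  simp only [max_lenght, max_lenght_alt, pair_foldl, foldl_stepA, pick_sorted]
  simp [pvOMax]
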